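-- pv_equiv track=rewrite | github.com/Yuuzi261/Zero-Judge | IOI&APCS/d103/d103.py | calIdentifier
-- ===== SOURCE A (Python) =====
-- def calIdentifier(ISBN: list):
--     identifier = 0
--     for i in range(len(ISBN) - 1):
--         identifier += int(ISBN[i]) * (i + 1)
--     identifier %= 11
--
--     if identifier != 10:
--         return str(identifier)
--     else:
--         return 'X'
-- ===== SOURCE B (Python) =====
-- def calIdentifier(ISBN: list):
--     s = 0
--     t = 0
--     for d in reversed(ISBN[:-1]):
--         s += int(d)
--         t += s
--     t %= 11
--     return 'X' if t == 10 else str(t)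
-- ===== Notes on version B (the rewrite author's own statement) =====
-- stated objective: alternative
-- what changed: Replaces the index-based weighted sum int(ISBN[i])*(i+1) by a reversed single pass with two running accumulators (s = running suffix sum, t = sum of the s values), which equals the weighted sum without any multiplication or indexing.
import Mathlib
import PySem

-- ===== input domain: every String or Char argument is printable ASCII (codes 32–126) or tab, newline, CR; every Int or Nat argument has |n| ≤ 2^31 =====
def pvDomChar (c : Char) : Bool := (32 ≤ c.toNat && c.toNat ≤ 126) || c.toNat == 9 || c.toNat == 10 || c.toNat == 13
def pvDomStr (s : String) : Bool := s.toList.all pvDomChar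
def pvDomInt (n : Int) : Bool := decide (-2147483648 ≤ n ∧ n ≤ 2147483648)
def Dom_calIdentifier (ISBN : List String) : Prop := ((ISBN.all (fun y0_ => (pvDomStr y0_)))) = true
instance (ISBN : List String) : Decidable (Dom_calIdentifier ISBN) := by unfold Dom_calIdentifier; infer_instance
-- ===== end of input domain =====

-- B replaces the index-weighted sum by a reversed pass with two running accumulators; objective: alternative decomposition, same cost.

-- ===== PORT A =====
-- int(ISBN[i]) is exact under Pre_ (every element of ISBN[:-1] parses); the loop index i < len-1 is
-- always in range, so getD is an exact port of ISBN[i].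
def calIdentifier (ISBN : List String) : String :=
  let identifier : Int :=
    (List.range (ISBN.length - 1)).foldl
      (fun acc i => acc + ((PySem.Int.ofStr? (ISBN.getD i "")).getD 0) * ((i : Int) + 1)) 0
  let identifier := PySem.Int.mod identifier 11
  if identifier ≠ 10 then PySem.Int.toStr identifier else "X"

-- ===== PORT B =====
def calIdentifier_alt (ISBN : List String) : String :=
  let st : Int × Int :=
    (PySem.List.slice ISBN none (some (-1))).reverse.foldl
      (fun p d =>
        let s := p.1 + (PySem.Int.ofStr? d).getD 0
        (s, p.2 + s)) (0, 0)
  let t := PySem.Int.mod st.2 11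
  if t == 10 then "X" else PySem.Int.toStr t

-- ===== PRECONDITION & SPEC =====
-- Pre_ excludes exactly the inputs where Python's int() raises ValueError on an element of ISBN[:-1].
def Pre_calIdentifier (ISBN : List String) : Prop :=
  ∀ s ∈ ISBN.dropLast, (PySem.Int.ofStr? s).isSome = true
instance (ISBN : List String) : Decidable (Pre_calIdentifier ISBN) := by
  unfold Pre_calIdentifier; infer_instance
def pvWitness_calIdentifier : List String := ["1", "2", "3"]

def Spec_calIdentifier (ISBN : List String) (out : String) : Prop := out = calIdentifier_alt ISBN
instance (ISBN : List String) (out : String) : Decidable (Spec_calIdentifier ISBN out) := by unfold Spec_calIdentifier; infer_instance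

-- ===== CLAIM (what is proved, stated in full; the proofs are below) =====
def Claim_equal_calIdentifier : Prop := ∀ (ISBN : List String), Dom_calIdentifier ISBN → Pre_calIdentifier ISBN → Spec_calIdentifier ISBN (calIdentifier ISBN)

-- ===== LEMMAS AND PROOFS =====

-- weighted sum: pvW l = Σ l[i]·(i+1), characterised recursively
def pvW : List Int → Int
  | [] => 0
  | x :: l => x + (pvW l + l.sum)

theorem pvW_append_singleton (l : List Int) (x : Int) :
    pvW (l ++ [x]) = pvW l + x * ((l.length : Int) + 1) := by
  induction l with
  | nil => simp [pvW]
  | cons y l ih => simp [pvW, ih]; ring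

theorem foldl_range_congr (n : Nat) (f g : Int → Nat → Int) (a : Int)
    (h : ∀ i < n, ∀ acc, f acc i = g acc i) :
    (List.range n).foldl f a = (List.range n).foldl g a := by
  induction n generalizing a with
  | zero => simp
  | succ n ih =>
      rw [List.range_succ, List.foldl_append, List.foldl_append,
          ih _ (fun i hi acc => h i (Nat.lt_succ_of_lt hi) acc)]
      simp [h n (Nat.lt_succ_self n)]

theorem foldl_range_eq_pvW (l : List Int) (acc : Int) :
    (List.range l.length).foldl (fun a i => a + l.getD i 0 * ((i : Int) + 1)) acc
      = acc + pvW l := by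
  induction l using List.reverseRecOn generalizing acc with
  | nil => simp [pvW]
  | append_singleton l x ih =>
      rw [List.length_append, List.length_singleton, List.range_succ, List.foldl_append]
      rw [foldl_range_congr l.length _ (fun a i => a + l.getD i 0 * ((i : Int) + 1)) acc
        (by
          intro i hi acc'
          have : (l ++ [x]).getD i 0 = l.getD i 0 := by
            simp [List.getD, List.getElem?_append_left hi]
          rw [this])]
      rw [ih]
      simp [pvW_append_singleton, List.getD]
      ring

theorem foldB_rev (l : List Int) :
    l.reverse.foldl (fun (p : Int × Int) d => (p.1 + d, p.2 + (p.1 + d))) (0, 0)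
      = (l.sum, pvW l) := by
  induction l with
  | nil => simp [pvW]
  | cons x l ih =>
      rw [List.reverse_cons, List.foldl_append, ih]
      simp only [List.foldl_cons, List.foldl_nil, List.sum_cons, pvW, Prod.mk.injEq]
      constructor <;> ring

-- for i < len-1, ISBN[i] parsed equals the i-th parsed value of ISBN[:-1]
theorem getD_parse_dropLast (ISBN : List String) (i : Nat) (hi : i < ISBN.length - 1) :
    (PySem.Int.ofStr? (ISBN.getD i "")).getD 0
      = (ISBN.dropLast.map (fun s => (PySem.Int.ofStr? s).getD 0)).getD i 0 := by
  have hi' : i < ISBN.dropLast.length := by simpa using hi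
  have hi'' : i < ISBN.length := lt_of_lt_of_le hi' (by simp only [List.length_dropLast]; omega)
  rw [List.getD_eq_getElem _ _ hi'', List.getD_eq_getElem _ _ (by simpa using hi')]
  simp [List.getElem_dropLast]

theorem body_eq (ISBN : List String) :
    calIdentifier ISBN = calIdentifier_alt ISBN := by
  have hA :
      (List.range (ISBN.length - 1)).foldl
        (fun acc i => acc + ((PySem.Int.ofStr? (ISBN.getD i "")).getD 0) * ((i : Int) + 1)) 0
        = pvW (ISBN.dropLast.map (fun s => (PySem.Int.ofStr? s).getD 0)) := by
    have hlen : ISBN.length - 1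
        = (ISBN.dropLast.map (fun s => (PySem.Int.ofStr? s).getD 0)).length := by simp
    rw [foldl_range_congr _ _
        (fun a i => a + (ISBN.dropLast.map (fun s => (PySem.Int.ofStr? s).getD 0)).getD i 0
            * ((i : Int) + 1)) 0
        (by intro i hi acc; rw [getD_parse_dropLast ISBN i hi])]
    rw [hlen, foldl_range_eq_pvW]; ring
  have hB :
      ISBN.dropLast.reverse.foldl
        (fun (p : Int × Int) d =>
          (p.1 + (PySem.Int.ofStr? d).getD 0, p.2 + (p.1 + (PySem.Int.ofStr? d).getD 0))) (0, 0)
        = ((ISBN.dropLast.map (fun s => (PySem.Int.ofStr? s).getD 0)).sum,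
            pvW (ISBN.dropLast.map (fun s => (PySem.Int.ofStr? s).getD 0))) := by
    rw [← foldB_rev (ISBN.dropLast.map (fun s => (PySem.Int.ofStr? s).getD 0)),
        ← List.map_reverse, List.foldl_map]
  simp only [calIdentifier, calIdentifier_alt, PySem.List.slice_to_neg_one, hA, hB]
  simp [ite_not]

-- ===== VERDICT (by name: the statement is the Claim_ definition above) =====
theorem calIdentifier_spec : Claim_equal_calIdentifier := by
  intro ISBN _ _
  unfold Spec_calIdentifier
  exact body_eq ISBN
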